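-- pv_equiv track=rewrite | github.com/deadlykitten4/DICE | training/RL/reward/rl_execute_kernel.py | get_chunk_indices
-- ===== SOURCE A (Python) =====
-- def get_chunk_indices(n, num_chunks):
--     size, rem = divmod(n, num_chunks)
--     idx, start = [], 0
--     for i in range(num_chunks):
--         extra = 1 if i < rem else 0
--         end   = start + size + extra
--         idx.append((start, end)); start = end
--     return idx
-- ===== SOURCE B (Python) =====
-- def get_chunk_indices(n, num_chunks):
--     size, rem = divmod(n, num_chunks)
--     return [(i * size + min(i, rem), (i + 1) * size + min(i + 1, rem))
--             for i in range(num_chunks)]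
-- ===== Notes on version B (the rewrite author's own statement) =====
-- stated objective: alternative
-- what changed: Replaces the running start=end accumulator loop with a stateless comprehension computing each chunk boundary from the closed form i*size + min(i, rem).
import Mathlib
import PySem

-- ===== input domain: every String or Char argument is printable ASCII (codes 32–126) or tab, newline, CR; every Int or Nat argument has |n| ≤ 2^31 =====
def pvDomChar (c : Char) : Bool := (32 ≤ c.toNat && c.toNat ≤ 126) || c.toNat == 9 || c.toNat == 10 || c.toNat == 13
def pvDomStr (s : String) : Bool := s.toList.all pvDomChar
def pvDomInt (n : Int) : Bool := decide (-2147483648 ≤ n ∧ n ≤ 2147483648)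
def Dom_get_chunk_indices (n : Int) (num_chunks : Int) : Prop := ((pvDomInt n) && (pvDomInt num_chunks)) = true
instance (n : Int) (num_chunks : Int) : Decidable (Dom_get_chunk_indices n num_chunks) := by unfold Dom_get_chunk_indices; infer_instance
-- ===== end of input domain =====

-- B replaces A's running start=end accumulator with a stateless closed-form boundary per chunk (alternative decomposition, same cost).

-- ===== PORT A =====
def get_chunk_indices (n : Int) (num_chunks : Int) : List (Int × Int) :=
  let size := PySem.Int.floordiv n num_chunks
  let rem := PySem.Int.mod n num_chunks
  ((PySem.List.pyRange 0 num_chunks 1).foldl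
    (fun (st : List (Int × Int) × Int) i =>
      let extra : Int := if i < rem then 1 else 0
      let e := st.2 + size + extra
      (st.1 ++ [(st.2, e)], e)) ([], 0)).1

-- ===== PORT B =====
def get_chunk_indices_alt (n : Int) (num_chunks : Int) : List (Int × Int) :=
  let size := PySem.Int.floordiv n num_chunks
  let rem := PySem.Int.mod n num_chunks
  (PySem.List.pyRange 0 num_chunks 1).map
    (fun i => (i * size + min i rem, (i + 1) * size + min (i + 1) rem))

-- ===== PRECONDITION & SPEC =====
-- Pre_ excludes num_chunks = 0, where Python's divmod raises ZeroDivisionError.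
def Pre_get_chunk_indices (n : Int) (num_chunks : Int) : Prop := num_chunks ≠ 0
instance (n : Int) (num_chunks : Int) : Decidable (Pre_get_chunk_indices n num_chunks) := by unfold Pre_get_chunk_indices; infer_instance
def pvWitness_get_chunk_indices : Int × Int := (10, 3)

def Spec_get_chunk_indices (n : Int) (num_chunks : Int) (out : List (Int × Int)) : Prop := out = get_chunk_indices_alt n num_chunks
instance (n : Int) (num_chunks : Int) (out : List (Int × Int)) : Decidable (Spec_get_chunk_indices n num_chunks out) := by unfold Spec_get_chunk_indices; infer_instance

-- ===== CLAIM (what is proved, stated in full; the proofs are below) =====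
def Claim_equal_get_chunk_indices : Prop := ∀ (n : Int) (num_chunks : Int), Dom_get_chunk_indices n num_chunks → Pre_get_chunk_indices n num_chunks → Spec_get_chunk_indices n num_chunks (get_chunk_indices n num_chunks)

-- ===== LEMMAS AND PROOFS =====

-- Loop invariant: after the first k iterations, the accumulator holds the closed-form
-- pairs for indices 0..k-1 and start = k*size + min k rem.
theorem pv_loop (size rem : Int) (hrem : 0 ≤ rem) (k : Nat) :
    (PySem.List.pyRange 0 (k : Int) 1).foldl
      (fun (st : List (Int × Int) × Int) i =>
        let extra : Int := if i < rem then 1 else 0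
        let e := st.2 + size + extra
        (st.1 ++ [(st.2, e)], e)) ([], 0)
    = ((PySem.List.pyRange 0 (k : Int) 1).map
         (fun i => (i * size + min i rem, (i + 1) * size + min (i + 1) rem)),
       (k : Int) * size + min (k : Int) rem) := by
  induction k with
  | zero =>
    simp [PySem.List.pyRange_one_eq_nil (by norm_num : (0:Int) ≤ 0)]
    omega
  | succ k ih =>
    have h : PySem.List.pyRange 0 ((k+1 : Nat) : Int) 1
        = PySem.List.pyRange 0 (k : Int) 1 ++ [(k : Int)] := by
      push_cast
      exact PySem.List.pyRange_one_succ_right (by positivity)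
    rw [h, List.foldl_append, ih, List.map_append]
    simp only [List.foldl_cons, List.foldl_nil, List.map_cons, List.map_nil]
    push_cast
    have hmul : ((k : Int) + 1) * size = (k : Int) * size + size := by ring
    have he : (k : Int) * size + min (k : Int) rem + size + (if (k : Int) < rem then (1:Int) else 0)
        = ((k : Int) + 1) * size + min ((k : Int) + 1) rem := by
      rw [hmul]; split_ifs with hc <;> omega
    rw [he]

-- ===== VERDICT (by name: the statement is the Claim_ definition above) =====
theorem get_chunk_indices_spec : Claim_equal_get_chunk_indices := by
  intro n num_chunks _ hpre
  unfold Spec_get_chunk_indices get_chunk_indices get_chunk_indices_alt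
  by_cases hpos : 0 < num_chunks
  · have hrem : 0 ≤ PySem.Int.mod n num_chunks := by
      rw [PySem.Int.mod_eq_emod_of_pos hpos]
      exact Int.emod_nonneg n (by omega)
    have hk : num_chunks = ((num_chunks.toNat : Nat) : Int) := by omega
    rw [hk] at hrem ⊢
    exact congrArg Prod.fst (pv_loop _ _ hrem num_chunks.toNat)
  · have : num_chunks ≤ 0 := by omega
    rw [PySem.List.pyRange_one_eq_nil this]
    simp
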